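-- pv_equiv track=rewrite | github.com/KonstBeliakov/asm_to_bf_compiler | compiler_optimisations.py | optimisation1
-- ===== SOURCE A (Python) =====
-- def optimisation1(code: str) -> str:
--     inv = {'+': '-', '-': '+', '>': '<', '<': '>', '[': ']', ']': '['}
--     stack = []
--     for ch in code:
--         if stack and ch in inv and stack[-1] == inv[ch]:
--             stack.pop()
--         else:
--             stack.append(ch)
--     return ''.join(stack)
-- ===== SOURCE B (Python) =====
-- def optimisation1(code: str) -> str:
--     inv = {'+': '-', '-': '+', '>': '<', '<': '>', '[': ']', ']': '['}
--     cur = code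
--     while True:
--         res = []
--         i = 0
--         while i < len(cur):
--             if i + 1 < len(cur) and inv.get(cur[i]) == cur[i + 1]:
--                 i += 2  # drop this adjacent inverse pair in this pass
--             else:
--                 res.append(cur[i])
--                 i += 1
--         nxt = ''.join(res)
--         if nxt == cur:
--             return cur
--         cur = nxt
-- ===== Notes on version B (the rewrite author's own statement) =====
-- stated objective: alternative
-- what changed: Replaces the single stack pass with repeated left-to-right sweeps that drop non-overlapping adjacent inverse pairs until a sweep changes nothing; the fixpoint equals the stack reduction because cancellation is confluent.
import Mathlib
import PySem

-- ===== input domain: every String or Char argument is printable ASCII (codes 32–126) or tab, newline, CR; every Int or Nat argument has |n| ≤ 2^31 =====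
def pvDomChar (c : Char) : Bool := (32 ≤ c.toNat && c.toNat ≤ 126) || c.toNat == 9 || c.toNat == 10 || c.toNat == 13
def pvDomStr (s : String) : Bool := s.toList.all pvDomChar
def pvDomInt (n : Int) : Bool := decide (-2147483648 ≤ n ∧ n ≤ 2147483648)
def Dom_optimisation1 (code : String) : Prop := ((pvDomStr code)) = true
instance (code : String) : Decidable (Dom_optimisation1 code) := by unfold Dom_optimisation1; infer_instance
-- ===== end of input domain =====

-- B replaces A's single stack pass by repeated whole-string sweeps that drop adjacent
-- inverse pairs until a sweep changes nothing (objective: alternative, not faster).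

-- ===== PORT A =====
-- the dict `inv` of the Python source (shared verbatim by both programs)
def invD : PySem.Dict Char Char :=
  PySem.Dict.ofList [('+','-'),('-','+'),('>','<'),('<','>'),('[',']'),(']','[')]

-- loop body of A: `if stack and ch in inv and stack[-1] == inv[ch]: pop else append`
def stepA (stack : List Char) (ch : Char) : List Char :=
  if stack ≠ [] ∧ PySem.Dict.contains invD ch = true ∧ stack.getLast? = PySem.Dict.get? invD ch
  then stack.dropLast
  else stack ++ [ch]

def optimisation1 (code : String) : String :=
  String.mk (code.toList.foldl stepA [])

-- ===== PORT B =====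
-- one sweep of Source B's inner while: drop each adjacent pair with inv.get(cur[i]) == cur[i+1],
-- otherwise copy cur[i] and move on
def passB : List Char → List Char
  | [] => []
  | [c] => [c]
  | a :: b :: rest =>
    if PySem.Dict.get? invD a = some b then passB rest else a :: passB (b :: rest)

theorem passB_length_le (xs : List Char) : (passB xs).length ≤ xs.length := by
  induction xs using passB.induct with
  | case1 => simp [passB]
  | case2 c => simp [passB]
  | case3 a b rest h ih => simp only [passB, if_pos h]; simp; omega
  | case4 a b rest h ih =>
    simp only [passB, if_neg h]
    simp only [List.length_cons] at ih ⊢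
    omega

theorem passB_progress (xs : List Char) :
    passB xs = xs ∨ (passB xs).length + 2 ≤ xs.length := by
  induction xs using passB.induct with
  | case1 => left; rfl
  | case2 c => left; rfl
  | case3 a b rest h ih =>
    right
    have := passB_length_le rest
    simp only [passB, if_pos h]
    simp; omega
  | case4 a b rest h ih =>
    rcases ih with h1 | h1
    · left; simp only [passB, if_neg h, h1]
    · right; simp only [passB, if_neg h]; simp at h1 ⊢; omega

-- Source B's outer while: sweep (nxt = one pass) until a sweep returns its input unchanged
def fixB (cur : List Char) : List Char :=
  if passB cur = cur then cur else fixB (passB cur)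
termination_by cur.length
decreasing_by
  rcases passB_progress cur with h2 | h2
  · exact absurd h2 (by assumption)
  · omega

def optimisation1_alt (code : String) : String :=
  String.mk (fixB code.toList)

-- ===== PRECONDITION & SPEC =====
def Spec_optimisation1 (code : String) (out : String) : Prop := out = optimisation1_alt code
instance (code : String) (out : String) : Decidable (Spec_optimisation1 code out) := by unfold Spec_optimisation1; infer_instance

-- ===== CLAIM (what is proved, stated in full; the proofs are below) =====
def Claim_equal_optimisation1 : Prop := ∀ (code : String), Dom_optimisation1 code → Spec_optimisation1 code (optimisation1 code)

-- ===== LEMMAS AND PROOFS =====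

-- the per-character inverse, as a plain function; get?_invD identifies it with the dict
def invFun (c : Char) : Option Char :=
  if c = '+' then some '-' else if c = '-' then some '+' else
  if c = '>' then some '<' else if c = '<' then some '>' else
  if c = '[' then some ']' else if c = ']' then some '[' else none

theorem get?_invD (c : Char) : PySem.Dict.get? invD c = invFun c := by
  have h : invD = PySem.Dict.mk [('+','-'),('-','+'),('>','<'),('<','>'),('[',']'),(']','[')] := by decide
  rw [h]; unfold invFun
  simp only [PySem.Dict.get?_mk_cons, beq_iff_eq]
  split_ifs <;> subst_vars <;> first | rfl | simp_all

theorem invFun_symm {a b : Char} (h : invFun a = some b) : invFun b = some a := by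
  unfold invFun at h ⊢
  split_ifs at h <;> simp only [Option.some.injEq] at h <;> subst_vars <;> decide

theorem invFun_inj {a b c : Char} (h1 : invFun a = some c) (h2 : invFun b = some c) : a = b := by
  unfold invFun at h1 h2
  split_ifs at h1 h2 <;>
    simp only [Option.some.injEq] at h1 h2 <;> subst_vars <;>
    first | rfl | exact absurd h2 (by decide)

-- canonical front-cancelling reduction: red xs is the fully cancelled form of xs
def gRed (c : Char) (acc : List Char) : List Char :=
  match acc with
  | [] => [c]
  | d :: ds => if invFun c = some d then ds else c :: d :: ds

def red (xs : List Char) : List Char := xs.foldr gRed []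

-- "no adjacent inverse pair"
def Reduced (xs : List Char) : Prop := List.IsChain (fun a b => invFun a ≠ some b) xs

theorem red_cons (c : Char) (xs : List Char) : red (c :: xs) = gRed c (red xs) := rfl

theorem gRed_reduced (c : Char) (r : List Char) (hr : Reduced r) : Reduced (gRed c r) := by
  match r with
  | [] => simp [gRed, Reduced]
  | d :: ds =>
    by_cases h : invFun c = some d
    · simpa [gRed, h, Reduced] using hr.tail
    · rw [gRed, if_neg h]
      exact List.isChain_cons_cons.mpr ⟨h, hr⟩

theorem red_reduced (xs : List Char) : Reduced (red xs) := by
  induction xs with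
  | nil => simp [red, Reduced]
  | cons c xs ih => exact gRed_reduced c (red xs) ih

theorem red_of_reduced (xs : List Char) (h : Reduced xs) : red xs = xs := by
  induction xs with
  | nil => rfl
  | cons c xs ih =>
    rw [red_cons, ih h.tail]
    match xs, h with
    | [], _ => rfl
    | d :: ds, h =>
      rw [gRed, if_neg (List.isChain_cons_cons.mp h).1]

theorem red_cancel (t c : Char) (h : invFun t = some c) :
    ∀ ys xs, red (ys ++ t :: c :: xs) = red (ys ++ xs) := by
  intro ys
  induction ys with
  | nil =>
    intro xs
    simp only [List.nil_append]
    rw [red_cons, red_cons]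
    have hred := red_reduced xs
    unfold Reduced at hred
    revert hred; generalize red xs = r; intro hred
    match r with
    | [] => simp [gRed, h]
    | d :: ds =>
      by_cases hcd : invFun c = some d
      · have htd : t = d := invFun_inj h (invFun_symm hcd)
        subst htd
        rw [show gRed c (t :: ds) = ds from by rw [gRed, if_pos hcd]]
        match ds with
        | [] => rfl
        | e :: es =>
          rw [gRed, if_neg (List.isChain_cons_cons.mp hred).1]
      · rw [show gRed c (d :: ds) = c :: d :: ds from by rw [gRed, if_neg hcd]]
        rw [gRed, if_pos h]
  | cons y ys ih =>
    intro xs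
    simp only [List.cons_append]
    rw [red_cons, red_cons, ih]

theorem red_passB (xs : List Char) : red (passB xs) = red xs := by
  induction xs using passB.induct with
  | case1 => rfl
  | case2 c => rfl
  | case3 a b rest h ih =>
    rw [get?_invD] at h
    rw [show passB (a :: b :: rest) = passB rest from by
      rw [passB, if_pos (by rw [get?_invD]; exact h)]]
    rw [ih]
    simpa using (red_cancel a b h [] rest).symm
  | case4 a b rest h ih =>
    rw [show passB (a :: b :: rest) = a :: passB (b :: rest) from by rw [passB, if_neg h]]
    rw [red_cons, ih, ← red_cons]

theorem passB_fix_reduced (xs : List Char) (hfix : passB xs = xs) : Reduced xs := by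
  induction xs using passB.induct with
  | case1 => simp [Reduced]
  | case2 c => simp [Reduced]
  | case3 a b rest h ih =>
    exfalso
    rw [passB, if_pos h] at hfix
    have h1 := passB_length_le rest
    rw [hfix] at h1
    simp at h1
  | case4 a b rest h ih =>
    rw [passB, if_neg h] at hfix
    have h2 : passB (b :: rest) = b :: rest := by
      injection hfix with h1 h2
    refine List.isChain_cons_cons.mpr ⟨?_, ih h2⟩
    intro hab
    exact h (by rw [get?_invD]; exact hab)

theorem fixB_eq_red_aux : ∀ (n : Nat) (xs : List Char), xs.length ≤ n → fixB xs = red xs := by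
  intro n
  induction n with
  | zero =>
    intro xs h
    have hnil : xs = [] := List.eq_nil_of_length_eq_zero (Nat.le_zero.mp h)
    subst hnil
    rw [fixB]
    simp [passB, red]
  | succ n ihn =>
    intro xs h
    by_cases hfix : passB xs = xs
    · rw [fixB, if_pos hfix]
      exact (red_of_reduced xs (passB_fix_reduced xs hfix)).symm
    · have hlt : (passB xs).length ≤ n := by
        rcases passB_progress xs with h1 | h1
        · exact absurd h1 hfix
        · omega
      rw [fixB, if_neg hfix, ihn (passB xs) hlt, red_passB]

theorem fixB_eq_red (xs : List Char) : fixB xs = red xs :=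
  fixB_eq_red_aux xs.length xs le_rfl

theorem foldA_red : ∀ (xs st : List Char), Reduced st →
    List.foldl stepA st xs = red (st ++ xs) := by
  intro xs
  induction xs with
  | nil =>
    intro st hst
    simpa using (red_of_reduced st hst).symm
  | cons c xs ih =>
    intro st hst
    rw [List.foldl_cons]
    by_cases hc : st ≠ [] ∧ PySem.Dict.contains invD c = true ∧ st.getLast? = PySem.Dict.get? invD c
    · obtain ⟨hne, hcont, hlast⟩ := hc
      have hsome : (PySem.Dict.get? invD c).isSome := by
        rw [← PySem.Dict.contains_eq_isSome_get?]; exact hcont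
      obtain ⟨v, hv⟩ := Option.isSome_iff_exists.mp hsome
      have hvf : invFun c = some v := by rw [← get?_invD]; exact hv
      have hlast' : st.getLast? = some v := by rw [hlast, hv]
      have hst_eq : st.dropLast ++ [v] = st := List.dropLast_append_getLast? v hlast'
      have hstep : stepA st c = st.dropLast := by
        rw [stepA, if_pos ⟨hne, hcont, hlast⟩]
      have hdrop : Reduced st.dropLast := by
        unfold Reduced at hst ⊢
        rw [← hst_eq] at hst
        exact (List.isChain_append.mp hst).1
      rw [hstep, ih st.dropLast hdrop]
      conv_rhs => rw [← hst_eq, List.append_assoc]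
      exact (red_cancel v c (invFun_symm hvf) st.dropLast xs).symm
    · have hstep : stepA st c = st ++ [c] := by rw [stepA, if_neg hc]
      have hred : Reduced (st ++ [c]) := by
        refine List.isChain_append.mpr ⟨hst, by simp, ?_⟩
        intro x hx y hy
        simp only [List.head?_cons, Option.mem_def, Option.some.injEq] at hy
        subst hy
        intro hxc
        have hcx : invFun c = some x := invFun_symm hxc
        refine hc ⟨?_, ?_, ?_⟩
        · intro hnil; rw [hnil] at hx; simp at hx
        · rw [PySem.Dict.contains_eq_isSome_get?, get?_invD, hcx]; rfl
        · rw [get?_invD, hcx]; exact hx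
      rw [hstep, ih (st ++ [c]) hred, List.append_assoc, List.singleton_append]

-- ===== VERDICT (by name: the statement is the Claim_ definition above) =====
theorem optimisation1_spec : Claim_equal_optimisation1 := by
  unfold Claim_equal_optimisation1
  intro code _
  unfold Spec_optimisation1 optimisation1 optimisation1_alt
  rw [foldA_red code.toList [] (by simp [Reduced]), fixB_eq_red]
  simp
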